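-- pv_equiv track=rewrite | github.com/LahiruSen/IEEE-Xtreme | Xtreme14/Hotel Wiring.py | calculatePoweredRooms
-- ===== SOURCE A (Python) =====
-- def calculatePoweredRooms(combination,c_wired_rooms,totalNumOfRooms):
--     numOfRooms = 0
--     for floor in range(len(c_wired_rooms)):
--         if floor in combination:
--             numOfRooms += totalNumOfRooms - c_wired_rooms[floor]
--         else:
--             numOfRooms +=c_wired_rooms[floor]
--     return numOfRooms
-- ===== SOURCE B (Python) =====
-- def calculatePoweredRooms(combination, c_wired_rooms, totalNumOfRooms):
--     # baseline: every floor contributes its wired count; each distinct wired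
--     # floor in range is corrected to (totalNumOfRooms - wired) instead.
--     total = sum(c_wired_rooms)
--     for floor in set(combination):
--         if 0 <= floor < len(c_wired_rooms):
--             total += totalNumOfRooms - 2 * c_wired_rooms[floor]
--     return total
-- ===== Notes on version B (the rewrite author's own statement) =====
-- stated objective: faster
-- what changed: Instead of looping over every floor and testing 'floor in combination' (a linear scan per floor), B starts from the fixed baseline sum(c_wired_rooms) and adds one correction totalNumOfRooms - 2*c_wired_rooms[floor] per distinct in-range member of combination.
import Mathlib
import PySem

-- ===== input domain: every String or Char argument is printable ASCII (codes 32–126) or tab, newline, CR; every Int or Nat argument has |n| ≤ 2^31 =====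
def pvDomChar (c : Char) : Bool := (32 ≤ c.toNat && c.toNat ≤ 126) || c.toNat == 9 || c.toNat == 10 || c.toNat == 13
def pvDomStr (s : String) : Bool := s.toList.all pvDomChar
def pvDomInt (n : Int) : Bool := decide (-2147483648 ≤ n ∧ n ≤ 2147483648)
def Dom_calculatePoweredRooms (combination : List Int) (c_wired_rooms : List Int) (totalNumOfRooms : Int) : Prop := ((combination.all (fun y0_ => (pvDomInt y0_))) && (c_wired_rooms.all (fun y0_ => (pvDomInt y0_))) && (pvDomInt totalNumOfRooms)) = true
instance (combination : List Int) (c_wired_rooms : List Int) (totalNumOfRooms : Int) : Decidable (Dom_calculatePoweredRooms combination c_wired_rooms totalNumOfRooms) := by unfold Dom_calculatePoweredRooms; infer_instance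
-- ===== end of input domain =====

-- B replaces A's per-floor membership scan by a baseline sum plus one correction per distinct in-range member of combination (faster).


-- ===== PORT A =====
def calculatePoweredRooms (combination : List Int) (c_wired_rooms : List Int) (totalNumOfRooms : Int) : Int :=
  (PySem.List.pyRange 0 (c_wired_rooms.length : Int) 1).foldl
    (fun numOfRooms floor =>
      if floor ∈ combination then
        numOfRooms + (totalNumOfRooms - PySem.List.pyGetD c_wired_rooms floor 0)
      else
        numOfRooms + PySem.List.pyGetD c_wired_rooms floor 0)
    0

-- ===== PORT B =====
def calculatePoweredRooms_alt (combination : List Int) (c_wired_rooms : List Int) (totalNumOfRooms : Int) : Int :=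
  (PySem.Set.ofList combination).foldl
    (fun total floor =>
      if 0 ≤ floor ∧ floor < (c_wired_rooms.length : Int) then
        total + (totalNumOfRooms - 2 * PySem.List.pyGetD c_wired_rooms floor 0)
      else
        total)
    c_wired_rooms.sum

-- ===== PRECONDITION & SPEC =====
def Spec_calculatePoweredRooms (combination : List Int) (c_wired_rooms : List Int) (totalNumOfRooms : Int) (out : Int) : Prop := out = calculatePoweredRooms_alt combination c_wired_rooms totalNumOfRooms
instance (combination : List Int) (c_wired_rooms : List Int) (totalNumOfRooms : Int) (out : Int) : Decidable (Spec_calculatePoweredRooms combination c_wired_rooms totalNumOfRooms out) := by unfold Spec_calculatePoweredRooms; infer_instance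

-- ===== CLAIM (what is proved, stated in full; the proofs are below) =====
def Claim_equal_calculatePoweredRooms : Prop := ∀ (combination : List Int) (c_wired_rooms : List Int) (totalNumOfRooms : Int), Dom_calculatePoweredRooms combination c_wired_rooms totalNumOfRooms → Spec_calculatePoweredRooms combination c_wired_rooms totalNumOfRooms (calculatePoweredRooms combination c_wired_rooms totalNumOfRooms)

-- ===== LEMMAS AND PROOFS =====

-- fold 'acc + f x' = init + sum of the mapped list (both branch shapes used by the two ports)
theorem pv_foldl_to_sum (l : List Int) (init : Int) (f : Int → Int) :
    l.foldl (fun acc x => acc + f x) init = init + (l.map f).sum := by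
  induction l generalizing init with
  | nil => simp
  | cons x xs ih => simp [List.foldl_cons, ih (init + f x)]; ring

-- a guarded sum is the sum over the filtered list
theorem pv_sum_ite_filter (l : List Int) (p : Int → Bool) (d : Int → Int) :
    (l.map (fun x => if p x then d x else 0)).sum = ((l.filter p).map d).sum := by
  induction l with
  | nil => rfl
  | cons x xs ih =>
    by_cases h : p x <;> simp [h, ih]

theorem calculatePoweredRooms_eq (combination : List Int) (c_wired_rooms : List Int) (totalNumOfRooms : Int) :
    calculatePoweredRooms combination c_wired_rooms totalNumOfRooms
      = calculatePoweredRooms_alt combination c_wired_rooms totalNumOfRooms := by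
  classical
  -- A-side: rewrite the loop body and split into baseline + correction sum
  have hA : calculatePoweredRooms combination c_wired_rooms totalNumOfRooms
      = c_wired_rooms.sum
        + (((PySem.List.pyRange 0 (c_wired_rooms.length : Int) 1).filter
              (fun i => decide (i ∈ combination))).map
            (fun i => totalNumOfRooms - 2 * PySem.List.pyGetD c_wired_rooms i 0)).sum := by
    have hbody : (fun (acc floor : Int) =>
        if floor ∈ combination then
          acc + (totalNumOfRooms - PySem.List.pyGetD c_wired_rooms floor 0)
        else
          acc + PySem.List.pyGetD c_wired_rooms floor 0)
      = fun acc floor => acc + (PySem.List.pyGetD c_wired_rooms floor 0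
          + (if decide (floor ∈ combination) then
              totalNumOfRooms - 2 * PySem.List.pyGetD c_wired_rooms floor 0 else 0)) := by
      funext acc floor
      by_cases h : floor ∈ combination <;> simp [h] <;> try ring
    unfold calculatePoweredRooms
    rw [hbody, pv_foldl_to_sum,
        PySem.List.sum_map_add_int,
        show (PySem.List.pyRange 0 (c_wired_rooms.length : Int) 1).map
            (fun floor => PySem.List.pyGetD c_wired_rooms floor 0) = c_wired_rooms from
          PySem.List.map_pyGetD_pyRange_zero c_wired_rooms (0 : Int),
        pv_sum_ite_filter]
    ring
  -- B-side: the fold over the set is baseline + correction sum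
  have hB : calculatePoweredRooms_alt combination c_wired_rooms totalNumOfRooms
      = c_wired_rooms.sum
        + (((PySem.Set.ofList combination).filter
              (fun x => decide (0 ≤ x ∧ x < (c_wired_rooms.length : Int)))).map
            (fun i => totalNumOfRooms - 2 * PySem.List.pyGetD c_wired_rooms i 0)).sum := by
    have hbody : (fun (total floor : Int) =>
        if 0 ≤ floor ∧ floor < (c_wired_rooms.length : Int) then
          total + (totalNumOfRooms - 2 * PySem.List.pyGetD c_wired_rooms floor 0)
        else
          total)
      = fun total floor => total + (if decide (0 ≤ floor ∧ floor < (c_wired_rooms.length : Int)) then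
          totalNumOfRooms - 2 * PySem.List.pyGetD c_wired_rooms floor 0 else 0) := by
      funext total floor
      simp only [decide_eq_true_eq]
      split <;> simp
    unfold calculatePoweredRooms_alt
    rw [hbody, pv_foldl_to_sum, pv_sum_ite_filter]
  -- the two filtered index lists are permutations of one another
  have hperm : ((PySem.List.pyRange 0 (c_wired_rooms.length : Int) 1).filter
        (fun i => decide (i ∈ combination))).Perm
      ((PySem.Set.ofList combination).filter
        (fun x => decide (0 ≤ x ∧ x < (c_wired_rooms.length : Int)))) := by
    apply (List.perm_ext_iff_of_nodup _ _).mpr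
    · intro x
      simp [List.mem_filter, PySem.List.mem_pyRange_one, PySem.Set.mem_ofList]
      tauto
    · exact (PySem.List.nodup_pyRange_one 0 (c_wired_rooms.length : Int)).filter _
    · exact (PySem.Set.nodup_ofList combination).filter _
  rw [hA, hB, List.Perm.sum_eq (List.Perm.map _ hperm)]

-- ===== VERDICT (by name: the statement is the Claim_ definition above) =====
theorem calculatePoweredRooms_spec : Claim_equal_calculatePoweredRooms := by
  intro combination c_wired_rooms totalNumOfRooms _
  exact calculatePoweredRooms_eq combination c_wired_rooms totalNumOfRooms
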